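-- pv_equiv track=rewrite | github.com/ajclarkin/AdventofCode2022 | day17-pyroclastic_flow/part1.py | NewShape
-- ===== SOURCE A (Python) =====
-- def NewShape(pattern, max_height):
--     '''
--     Create a list with the positions of each block making up the new shape.
--     Use an int to track which shape gets added next, 0-4:
--         - + _| | #
--     '''
--     newshape = []
--
--     if pattern == 0:
--         # horizontal line
--         newshape = [(max_height+4, x) for x in range(2, 6)]
--
--     if pattern == 1:
--         # plus sign
--         newshape = [(max_height+4+1, x) for x in range(2, 5)]
--         newshape.extend([(max_height+4+x, 3) for x in range(0,3,2)])
--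
--     if pattern == 2:
--         # reverse L
--         newshape = [(max_height+4, x) for x in range(2, 5)]
--         newshape.extend([(max_height+4+x, 4) for x in range(1, 3)])
--
--
--     elif pattern == 3:
--         # vertical line
--         newshape = [(max_height+4+x, 2) for x in range(4)]
--
--     elif pattern == 4:
--         # 2x2 square
--         newshape = [(max_height+4+r, c+2) for r in range(2) for c in range(2)]
--
--     return newshape
-- ===== SOURCE B (Python) =====
-- # Table-driven: one static table of relative (row,col) offsets per shape, one comprehension.
-- _OFFSETS = {
--     0: [(0, 0), (0, 1), (0, 2), (0, 3)],            # horizontal line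
--     1: [(1, 0), (1, 1), (1, 2), (0, 1), (2, 1)],    # plus sign (A's emission order)
--     2: [(0, 0), (0, 1), (0, 2), (1, 2), (2, 2)],    # reverse L
--     3: [(0, 0), (1, 0), (2, 0), (3, 0)],            # vertical line
--     4: [(0, 0), (0, 1), (1, 0), (1, 1)],            # 2x2 square
-- }
--
-- def NewShape(pattern, max_height):
--     return [(max_height + 4 + dr, 2 + dc) for (dr, dc) in _OFFSETS.get(pattern, [])]
-- ===== Notes on version B (the rewrite author's own statement) =====
-- stated objective: simpler
-- what changed: Replaced the five per-shape comprehension/extend branches with one static table of relative offsets and a single comprehension over it.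
import Mathlib
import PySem

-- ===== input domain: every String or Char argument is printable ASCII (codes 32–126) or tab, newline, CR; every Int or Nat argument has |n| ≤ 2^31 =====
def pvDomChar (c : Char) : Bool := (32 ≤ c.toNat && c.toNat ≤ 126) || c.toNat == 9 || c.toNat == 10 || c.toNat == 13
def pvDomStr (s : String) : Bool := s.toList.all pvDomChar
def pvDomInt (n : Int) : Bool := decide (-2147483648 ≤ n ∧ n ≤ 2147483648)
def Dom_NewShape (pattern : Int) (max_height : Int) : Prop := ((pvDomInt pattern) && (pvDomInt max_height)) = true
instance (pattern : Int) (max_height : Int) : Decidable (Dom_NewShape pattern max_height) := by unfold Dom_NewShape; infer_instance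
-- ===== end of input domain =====

-- B replaces A's five per-shape branches by one static offset table and a single map; objective: simpler.


-- ===== PORT A =====
def NewShape (pattern : Int) (max_height : Int) : List (Int × Int) :=
  let newshape : List (Int × Int) := []
  let newshape :=
    if pattern == 0 then
      (PySem.List.pyRange 2 6 1).map (fun x => (max_height + 4, x))
    else newshape
  let newshape :=
    if pattern == 1 then
      ((PySem.List.pyRange 2 5 1).map (fun x => (max_height + 4 + 1, x))) ++
        ((PySem.List.pyRange 0 3 2).map (fun x => (max_height + 4 + x, (3 : Int))))
    else newshape
  let newshape :=
    if pattern == 2 then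
      ((PySem.List.pyRange 2 5 1).map (fun x => (max_height + 4, x))) ++
        ((PySem.List.pyRange 1 3 1).map (fun x => (max_height + 4 + x, (4 : Int))))
    else if pattern == 3 then
      (PySem.List.pyRange 0 4 1).map (fun x => (max_height + 4 + x, (2 : Int)))
    else if pattern == 4 then
      ((PySem.List.pyRange 0 2 1).map (fun r =>
        (PySem.List.pyRange 0 2 1).map (fun c => (max_height + 4 + r, c + 2)))).flatten
    else newshape
  newshape

-- ===== PORT B =====
-- the static _OFFSETS dict of Source B, as an association list (PySem.Dict)
def pvOffsets : PySem.Dict Int (List (Int × Int)) :=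
  PySem.Dict.ofList
  [(0, [(0, 0), (0, 1), (0, 2), (0, 3)]),
   (1, [(1, 0), (1, 1), (1, 2), (0, 1), (2, 1)]),
   (2, [(0, 0), (0, 1), (0, 2), (1, 2), (2, 2)]),
   (3, [(0, 0), (1, 0), (2, 0), (3, 0)]),
   (4, [(0, 0), (0, 1), (1, 0), (1, 1)])]

def NewShape_alt (pattern : Int) (max_height : Int) : List (Int × Int) :=
  (PySem.Dict.getD pvOffsets pattern []).map (fun p => (max_height + 4 + p.1, 2 + p.2))

-- ===== PRECONDITION & SPEC =====
def Spec_NewShape (pattern : Int) (max_height : Int) (out : List (Int × Int)) : Prop := out = NewShape_alt pattern max_height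
instance (pattern : Int) (max_height : Int) (out : List (Int × Int)) : Decidable (Spec_NewShape pattern max_height out) := by unfold Spec_NewShape; infer_instance

-- ===== CLAIM (what is proved, stated in full; the proofs are below) =====
def Claim_equal_NewShape : Prop := ∀ (pattern : Int) (max_height : Int), Dom_NewShape pattern max_height → Spec_NewShape pattern max_height (NewShape pattern max_height)

-- ===== LEMMAS AND PROOFS =====

-- ===== VERDICT (by name: the statement is the Claim_ definition above) =====
theorem NewShape_spec : Claim_equal_NewShape := by
  intro pattern max_height _
  unfold Spec_NewShape NewShape NewShape_alt pvOffsets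
  by_cases h0 : pattern = 0
  · subst h0
    simp [PySem.Dict.getD, PySem.Dict.get?, PySem.Dict.ofList, PySem.Dict.update,
          PySem.Dict.insert, PySem.Dict.empty, PySem.List.pyRange_one, List.range_succ]
  by_cases h1 : pattern = 1
  · subst h1
    simp [PySem.Dict.getD, PySem.Dict.get?, PySem.Dict.ofList, PySem.Dict.update,
          PySem.Dict.insert, PySem.Dict.empty, List.range_succ, PySem.List.pyRange]
  by_cases h2 : pattern = 2
  · subst h2
    simp [PySem.Dict.getD, PySem.Dict.get?, PySem.Dict.ofList, PySem.Dict.update,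
          PySem.Dict.insert, PySem.Dict.empty, PySem.List.pyRange_one, List.range_succ]
  by_cases h3 : pattern = 3
  · subst h3
    simp [PySem.Dict.getD, PySem.Dict.get?, PySem.Dict.ofList, PySem.Dict.update,
          PySem.Dict.insert, PySem.Dict.empty, PySem.List.pyRange_one, List.range_succ]
  by_cases h4 : pattern = 4
  · subst h4
    simp [PySem.Dict.getD, PySem.Dict.get?, PySem.Dict.ofList, PySem.Dict.update,
          PySem.Dict.insert, PySem.Dict.empty, PySem.List.pyRange_one, List.range_succ]
  -- pattern outside 0–4: both A and B return []
  have e0 : ((0 : Int) == pattern) = false := by simp; exact fun h => h0 h.symm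
  have e1 : ((1 : Int) == pattern) = false := by simp; exact fun h => h1 h.symm
  have e2 : ((2 : Int) == pattern) = false := by simp; exact fun h => h2 h.symm
  have e3 : ((3 : Int) == pattern) = false := by simp; exact fun h => h3 h.symm
  have e4 : ((4 : Int) == pattern) = false := by simp; exact fun h => h4 h.symm
  simp [PySem.Dict.getD, PySem.Dict.get?, PySem.Dict.ofList, PySem.Dict.update,
        PySem.Dict.insert, PySem.Dict.empty, e0, e1, e2, e3, e4, h0, h1, h2, h3, h4]
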